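-- pv_equiv track=rewrite | github.com/royadityak94/InterviewPrep | Grokking/DP/pattern_5/Practice2/string_interleaving.py | interleaved_string_nondp
-- ===== SOURCE A (Python) =====
-- def interleaved_string_nondp(m, n, p):
--     queue1, queue2 = list(m), list(n)
--
--     for ch in p:
--         if queue1 and ch in queue1[0]:
--             queue1.pop(0)
--         if queue2 and ch in queue2[0]:
--             queue2.pop(0)
--     return (not queue1) and (not queue2)
-- ===== SOURCE B (Python) =====
-- def interleaved_string_nondp(m, n, p):
--     def is_sub(s):
--         it = iter(p)
--         return all(c in it for c in s)
--     return is_sub(m) and is_sub(n)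
-- ===== Notes on version B (the rewrite author's own statement) =====
-- stated objective: idiomatic
-- what changed: A sweeps p once, popping the fronts of two list queues with pop(0); B observes the check factors into two independent subsequence tests and writes each as 'all(c in it for c in s)' over a fresh p-iterator, looping over m/n instead of p and keeping an iterator instead of list queues.
import Mathlib
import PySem

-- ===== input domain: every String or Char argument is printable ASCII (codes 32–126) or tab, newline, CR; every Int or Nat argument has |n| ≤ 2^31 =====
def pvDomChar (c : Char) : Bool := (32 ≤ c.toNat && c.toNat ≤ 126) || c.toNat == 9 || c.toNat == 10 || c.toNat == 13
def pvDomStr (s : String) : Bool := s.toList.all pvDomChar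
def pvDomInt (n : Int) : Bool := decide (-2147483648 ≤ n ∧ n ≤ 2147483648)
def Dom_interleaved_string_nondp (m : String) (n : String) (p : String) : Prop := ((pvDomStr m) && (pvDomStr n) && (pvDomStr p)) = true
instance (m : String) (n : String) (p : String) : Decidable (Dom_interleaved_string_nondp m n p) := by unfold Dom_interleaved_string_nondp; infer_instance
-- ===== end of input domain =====

-- B replaces A's single sweep of p over two list queues by two independent
-- subsequence tests, each consuming one p-iterator while looping over m / n (idiomatic).


-- ===== PORT A =====
-- one step of A's loop body on one queue: 'if queue and ch in queue[0]: queue.pop(0)'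
-- (queue elements are single characters, so 'ch in queue[0]' is equality)
def pvStepQ (q : List Char) (ch : Char) : List Char :=
  match q with
  | [] => []
  | c :: rest => if ch == c then rest else q

def interleaved_string_nondp (m : String) (n : String) (p : String) : Bool :=
  let st := p.toList.foldl
    (fun (st : List Char × List Char) ch => (pvStepQ st.1 ch, pvStepQ st.2 ch))
    (m.toList, n.toList)
  st.1.isEmpty && st.2.isEmpty

-- ===== PORT B =====
-- 'c in it' on a list-iterator: drop everything up to and including the first c;
-- none = the iterator is exhausted without finding c (the 'all' fails).
def pvDropAfter (c : Char) : List Char → Option (List Char)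
  | [] => none
  | x :: xs => if x == c then some xs else pvDropAfter c xs

-- is_sub(s): loop over s pulling from a single p-iterator
def pvIsSub : List Char → List Char → Bool
  | [], _ => true
  | c :: s, it =>
    match pvDropAfter c it with
    | none => false
    | some it' => pvIsSub s it'

def interleaved_string_nondp_alt (m : String) (n : String) (p : String) : Bool :=
  pvIsSub m.toList p.toList && pvIsSub n.toList p.toList

-- ===== PRECONDITION & SPEC =====
def Spec_interleaved_string_nondp (m : String) (n : String) (p : String) (out : Bool) : Prop := out = interleaved_string_nondp_alt m n p
instance (m : String) (n : String) (p : String) (out : Bool) : Decidable (Spec_interleaved_string_nondp m n p out) := by unfold Spec_interleaved_string_nondp; infer_instance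

-- ===== CLAIM (what is proved, stated in full; the proofs are below) =====
def Claim_equal_interleaved_string_nondp : Prop := ∀ (m : String) (n : String) (p : String), Dom_interleaved_string_nondp m n p → Spec_interleaved_string_nondp m n p (interleaved_string_nondp m n p)

-- ===== LEMMAS AND PROOFS =====

-- A's fold on the pair is the product of the two single-queue folds
theorem pvFold_pair (p : List Char) (a b : List Char) :
    p.foldl (fun (st : List Char × List Char) ch => (pvStepQ st.1 ch, pvStepQ st.2 ch)) (a, b)
      = (p.foldl pvStepQ a, p.foldl pvStepQ b) := by
  induction p generalizing a b with
  | nil => rfl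
  | cons ch p ih => simpa [List.foldl] using ih (pvStepQ a ch) (pvStepQ b ch)

theorem pvFold_nil (p : List Char) : p.foldl pvStepQ [] = [] := by
  induction p with
  | nil => rfl
  | cons ch p ih => simpa [List.foldl, pvStepQ] using ih

-- the single-queue fold empties iff B's subsequence test succeeds
theorem pvIsSub_eq_fold (p q : List Char) :
    pvIsSub q p = (p.foldl pvStepQ q).isEmpty := by
  induction p generalizing q with
  | nil => cases q <;> simp [pvIsSub, pvDropAfter]
  | cons ch p ih =>
    cases q with
    | nil => simp [pvIsSub, List.foldl, pvStepQ, pvFold_nil]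
    | cons c s =>
      by_cases h : ch = c
      · subst h
        simp [pvIsSub, pvDropAfter, List.foldl, pvStepQ, ← ih s]
      · have hne : (ch == c) = false := by simp [h]
        have : pvIsSub (c :: s) (ch :: p) = pvIsSub (c :: s) p := by
          simp [pvIsSub, pvDropAfter, hne]
        rw [this, ih (c :: s)]
        simp [List.foldl, pvStepQ, hne]

-- ===== VERDICT (by name: the statement is the Claim_ definition above) =====
theorem interleaved_string_nondp_spec : Claim_equal_interleaved_string_nondp := by
  intro m n p _
  unfold Spec_interleaved_string_nondp interleaved_string_nondp interleaved_string_nondp_alt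
  simp only [pvFold_pair, pvIsSub_eq_fold]
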